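-- pv_equiv track=rewrite | github.com/legffy/CS100 | hw7/hw7_part2.py | filterDates
-- ===== SOURCE A (Python) =====
-- def filterDates(m,r,low,high):
--     #creates copys to not alter the originals
--     nM = m.copy()
--     nR = r.copy()
--     #deletes if the movie year from movies is not within low and high
--     for x in m:
--         date = nM[x]['movie_year']
--         if x not in nR:
--             del nM[x]
--         elif date>high or date<low:
--             del nM[x]
--             del nR[x]
--     return (nM,nR)
-- ===== SOURCE B (Python) =====
-- def filterDates(m, r, low, high):
--     # keys of m whose movie_year lies outside [low, high] (reads movie_year for every key of m, like the original)
--     bad = {x for x in m if m[x]['movie_year'] > high or m[x]['movie_year'] < low}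
--     nM = {k: v for k, v in m.items() if k in r and k not in bad}
--     nR = {k: v for k, v in r.items() if not (k in m and k in bad)}
--     return (nM, nR)
-- ===== Notes on version B (the rewrite author's own statement) =====
-- stated objective: simpler
-- what changed: Replaces the mutate-two-copies loop (deleting from both dicts while iterating the first) with a constructive pass: a set of out-of-range movie keys, then two dict comprehensions that filter m and r.
import Mathlib
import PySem

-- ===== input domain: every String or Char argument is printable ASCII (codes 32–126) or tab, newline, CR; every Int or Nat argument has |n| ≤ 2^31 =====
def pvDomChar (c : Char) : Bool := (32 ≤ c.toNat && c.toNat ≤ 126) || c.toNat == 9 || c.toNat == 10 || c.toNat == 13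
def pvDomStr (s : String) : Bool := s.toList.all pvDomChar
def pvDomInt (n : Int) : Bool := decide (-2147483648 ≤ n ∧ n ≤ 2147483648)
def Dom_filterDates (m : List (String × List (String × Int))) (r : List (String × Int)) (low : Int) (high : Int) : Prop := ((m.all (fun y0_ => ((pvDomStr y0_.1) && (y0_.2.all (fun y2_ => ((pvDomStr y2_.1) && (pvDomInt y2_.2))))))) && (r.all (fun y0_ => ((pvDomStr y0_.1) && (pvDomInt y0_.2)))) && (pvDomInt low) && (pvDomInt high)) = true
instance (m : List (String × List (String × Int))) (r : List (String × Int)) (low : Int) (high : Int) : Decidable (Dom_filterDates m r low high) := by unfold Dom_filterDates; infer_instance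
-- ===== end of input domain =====

-- B replaces A's delete-from-two-copies loop with a constructive filter pass (a set of
-- out-of-range keys plus two dict comprehensions); objective: simpler.


-- ===== PORT A =====
-- d['movie_year'] on the inner dict; none (KeyError) is excluded by Pre_, so the getD 0 default is never taken there
def pvYear (d : List (String × Int)) : Int :=
  ((PySem.Dict.mk d).get? "movie_year").getD 0

-- the body of A's 'for x in m' loop, acting on the state (nM, nR)
def pvStepA (low high : Int)
    (st : PySem.Dict String (List (String × Int)) × PySem.Dict String Int) (x : String) :
    PySem.Dict String (List (String × Int)) × PySem.Dict String Int :=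
  let nM := st.1
  let nR := st.2
  let date := pvYear (nM.getD x [])
  if nR.contains x = false then (nM.erase x, nR)
  else if date > high ∨ date < low then (nM.erase x, nR.erase x)
  else (nM, nR)

def filterDates (m : List (String × List (String × Int))) (r : List (String × Int)) (low : Int) (high : Int) : (List (String × List (String × Int))) × (List (String × Int)) :=
  let mD : PySem.Dict String (List (String × Int)) := PySem.Dict.mk m
  let rD : PySem.Dict String Int := PySem.Dict.mk r
  let res := mD.keys.foldl (pvStepA low high) (mD, rD)
  (res.1.items, res.2.items)

-- ===== PORT B =====
def filterDates_alt (m : List (String × List (String × Int))) (r : List (String × Int)) (low : Int) (high : Int) : (List (String × List (String × Int))) × (List (String × Int)) :=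
  let mD : PySem.Dict String (List (String × Int)) := PySem.Dict.mk m
  let rD : PySem.Dict String Int := PySem.Dict.mk r
  -- bad = {x for x in m if m[x]['movie_year'] > high or m[x]['movie_year'] < low}
  let bad : PySem.Set String :=
    PySem.Set.ofList (mD.keys.filter (fun x =>
      decide (pvYear (mD.getD x []) > high) || decide (pvYear (mD.getD x []) < low)))
  -- the two dict comprehensions iterate .items(); with a dict's distinct keys (Pre_) the
  -- built dict is exactly the filtered assoc list
  let nM := mD.items.filter (fun kv => rD.contains kv.1 && !(PySem.Set.contains bad kv.1))
  let nR := rD.items.filter (fun kv => !(mD.contains kv.1 && PySem.Set.contains bad kv.1))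
  (nM, nR)

-- ===== PRECONDITION & SPEC =====
-- Pre_ excludes (a) assoc lists with duplicate keys, which cannot arise from a Python dict
-- argument (dict keys are unique), and (b) movie dicts lacking a 'movie_year' key, on which A
-- raises KeyError.
def Pre_filterDates (m : List (String × List (String × Int))) (r : List (String × Int)) (low : Int) (high : Int) : Prop :=
  (m.map Prod.fst).Nodup ∧ (r.map Prod.fst).Nodup ∧
  (∀ p ∈ m, (p.2.map Prod.fst).Nodup) ∧
  (∀ p ∈ m, (PySem.Dict.mk p.2).contains "movie_year" = true)
instance (m : List (String × List (String × Int))) (r : List (String × Int)) (low : Int) (high : Int) : Decidable (Pre_filterDates m r low high) := by unfold Pre_filterDates; infer_instance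

def pvWitness_filterDates : (List (String × List (String × Int))) × (List (String × Int)) × Int × Int :=
  ([("a", [("movie_year", 1999)]), ("b", [("movie_year", 2020)])], [("a", 5), ("c", 7)], 1990, 2000)

def Spec_filterDates (m : List (String × List (String × Int))) (r : List (String × Int)) (low : Int) (high : Int) (out : (List (String × List (String × Int))) × (List (String × Int))) : Prop := out = filterDates_alt m r low high
instance (m : List (String × List (String × Int))) (r : List (String × Int)) (low : Int) (high : Int) (out : (List (String × List (String × Int))) × (List (String × Int))) : Decidable (Spec_filterDates m r low high out) := by unfold Spec_filterDates; infer_instance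

-- ===== CLAIM (what is proved, stated in full; the proofs are below) =====
def Claim_equal_filterDates : Prop := ∀ (m : List (String × List (String × Int))) (r : List (String × Int)) (low : Int) (high : Int), Dom_filterDates m r low high → Pre_filterDates m r low high → Spec_filterDates m r low high (filterDates m r low high)

-- ===== LEMMAS AND PROOFS =====

-- 'kv out of range', read from the dict M, as port A's loop computes it
def pvOob (low high : Int) (M : PySem.Dict String (List (String × Int))) (x : String) : Bool :=
  decide (pvYear (M.getD x []) > high) || decide (pvYear (M.getD x []) < low)

-- find?/any of a key ≠ k pass unchanged through erasing key k
theorem pv_find?_filter_ne {ν : Type} (l : List (String × ν)) (k k' : String) (h : k' ≠ k) :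
    (l.filter (fun p => !(p.1 == k))).find? (fun p => p.1 == k') = l.find? (fun p => p.1 == k') := by
  induction l with
  | nil => rfl
  | cons a t ih =>
    by_cases ha : a.1 = k'
    · simp [ha, h]
    · by_cases hak : a.1 = k
      · simp [hak, Ne.symm h, ih]
      · simp [ha, hak, ih]

theorem pv_any_filter_ne {ν : Type} (l : List (String × ν)) (k k' : String) (h : k' ≠ k) :
    (l.filter (fun p => !(p.1 == k))).any (fun p => p.1 == k') = l.any (fun p => p.1 == k') := by
  induction l with
  | nil => rfl
  | cons a t ih =>
    by_cases ha : a.1 = k'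
    · simp [ha, h]
    · by_cases hak : a.1 = k
      · simp [hak, Ne.symm h, ih]
      · simp [hak, ih]

theorem pv_get?_erase_ne {ν : Type} (d : PySem.Dict String ν) (k k' : String) (h : k' ≠ k) :
    (d.erase k).get? k' = d.get? k' := by
  simp [PySem.Dict.get?, PySem.Dict.erase, pv_find?_filter_ne d.items k k' h]

theorem pv_getD_erase_ne {ν : Type} (d : PySem.Dict String ν) (k k' : String) (v : ν) (h : k' ≠ k) :
    (d.erase k).getD k' v = d.getD k' v := by
  simp [PySem.Dict.getD, pv_get?_erase_ne d k k' h]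

theorem pv_contains_erase_ne {ν : Type} (d : PySem.Dict String ν) (k k' : String) (h : k' ≠ k) :
    (d.erase k).contains k' = d.contains k' := by
  simp [PySem.Dict.contains, PySem.Dict.erase, pv_any_filter_ne d.items k k' h]

theorem pv_oob_erase (low high : Int) (M : PySem.Dict String (List (String × Int))) (k k' : String)
    (h : k' ≠ k) : pvOob low high (M.erase k) k' = pvOob low high M k' := by
  simp [pvOob, pv_getD_erase_ne M k k' [] h]

theorem pv_items_erase {ν : Type} (d : PySem.Dict String ν) (k : String) :
    (d.erase k).items = d.items.filter (fun p => !(p.1 == k)) := rfl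

-- the loop of A, characterised: it filters both dicts
theorem pvLoop (low high : Int) : ∀ (ms : List String)
    (M : PySem.Dict String (List (String × Int))) (R : PySem.Dict String Int), ms.Nodup →
    ms.foldl (pvStepA low high) (M, R) =
      (PySem.Dict.mk (M.items.filter (fun kv =>
          !decide (kv.1 ∈ ms) || (R.contains kv.1 && !pvOob low high M kv.1))),
       PySem.Dict.mk (R.items.filter (fun kv =>
          !decide (kv.1 ∈ ms) || !pvOob low high M kv.1))) := by
  intro ms
  induction ms with
  | nil => intro M R _; simp
  | cons x t ih =>
    intro M R hnd
    have hx : x ∉ t := (List.nodup_cons.mp hnd).1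
    have hnd' : t.Nodup := (List.nodup_cons.mp hnd).2
    rw [List.foldl_cons]
    by_cases hc : R.contains x = false
    · -- x not in nR: del nM[x]
      have hstep : pvStepA low high (M, R) x = (M.erase x, R) := by
        simp [pvStepA, hc]
      rw [hstep, ih (M.erase x) R hnd']
      refine Prod.ext ?_ ?_ <;> simp only
      · rw [pv_items_erase, List.filter_filter]
        refine congrArg PySem.Dict.mk (List.filter_congr ?_)
        intro kv hkv
        by_cases hk : kv.1 = x
        · simp [hk, hc]
        · simp [List.mem_cons, hk, pv_oob_erase low high M x kv.1 hk]
      · refine congrArg PySem.Dict.mk (List.filter_congr ?_)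
        intro kv hkv
        have hk : kv.1 ≠ x := by
          intro hk
          have : R.contains x = true := by
            simp only [PySem.Dict.contains]
            exact List.any_eq_true.mpr ⟨kv, hkv, by simp [hk]⟩
          simp [this] at hc
        simp [List.mem_cons, hk, pv_oob_erase low high M x kv.1 hk]
    · have hc' : R.contains x = true := by revert hc; cases R.contains x <;> simp
      by_cases hoob : pvYear (M.getD x []) > high ∨ pvYear (M.getD x []) < low
      · -- out of range: del nM[x]; del nR[x]
        have hstep : pvStepA low high (M, R) x = (M.erase x, R.erase x) := by
          simp [pvStepA, hc', hoob]
        have hob : pvOob low high M x = true := by simp [pvOob]; tauto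
        rw [hstep, ih (M.erase x) (R.erase x) hnd']
        refine Prod.ext ?_ ?_ <;> simp only
        · rw [pv_items_erase, List.filter_filter]
          refine congrArg PySem.Dict.mk (List.filter_congr ?_)
          intro kv hkv
          by_cases hk : kv.1 = x
          · simp [hk, hob]
          · simp [List.mem_cons, hk, pv_oob_erase low high M x kv.1 hk,
                  pv_contains_erase_ne R x kv.1 hk]
        · rw [pv_items_erase, List.filter_filter]
          refine congrArg PySem.Dict.mk (List.filter_congr ?_)
          intro kv hkv
          by_cases hk : kv.1 = x
          · simp [hk, hob]
          · simp [List.mem_cons, hk, pv_oob_erase low high M x kv.1 hk]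
      · -- in range and in r: keep
        have hstep : pvStepA low high (M, R) x = (M, R) := by
          simp [pvStepA, hc', hoob]
        have hob : pvOob low high M x = false := by
          simp only [pvOob]
          rcases not_or.mp hoob with ⟨h1, h2⟩
          simp [h1, h2]
        rw [hstep, ih M R hnd']
        refine Prod.ext ?_ ?_ <;> simp only
        · refine congrArg PySem.Dict.mk (List.filter_congr ?_)
          intro kv hkv
          by_cases hk : kv.1 = x
          · simp [hk, hx, hc', hob]
          · simp [List.mem_cons, hk]
        · refine congrArg PySem.Dict.mk (List.filter_congr ?_)
          intro kv hkv
          by_cases hk : kv.1 = x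
          · simp [hk, hx, hob]
          · simp [List.mem_cons, hk]

theorem pv_set_contains_bad (m : List (String × List (String × Int))) (low high : Int) (x : String)
    (hmem : x ∈ m.map Prod.fst) :
    PySem.Set.contains (PySem.Set.ofList ((m.map Prod.fst).filter (fun x =>
      decide (pvYear ((PySem.Dict.mk m).getD x []) > high) ||
      decide (pvYear ((PySem.Dict.mk m).getD x []) < low)))) x
      = pvOob low high (PySem.Dict.mk m) x := by
  have hmemiff : x ∈ ((m.map Prod.fst).filter (fun x =>
      decide (pvYear ((PySem.Dict.mk m).getD x []) > high) ||
      decide (pvYear ((PySem.Dict.mk m).getD x []) < low)))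
      ↔ pvOob low high (PySem.Dict.mk m) x = true := by
    rw [List.mem_filter]
    simp [hmem, pvOob]
  have hiff := (PySem.Set.mem_ofList ((m.map Prod.fst).filter (fun x =>
      decide (pvYear ((PySem.Dict.mk m).getD x []) > high) ||
      decide (pvYear ((PySem.Dict.mk m).getD x []) < low))) x).trans hmemiff
  by_cases hb : pvOob low high (PySem.Dict.mk m) x = true
  · simp [PySem.Set.contains, List.contains_eq_mem, hiff, hb]
  · have hb' : pvOob low high (PySem.Dict.mk m) x = false := eq_false_of_ne_true hb
    simp [PySem.Set.contains, List.contains_eq_mem, hiff, hb']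

-- ===== VERDICT (by name: the statement is the Claim_ definition above) =====
theorem filterDates_spec : Claim_equal_filterDates := by
  unfold Claim_equal_filterDates
  intro m r low high _ hpre
  obtain ⟨h1, h2, -, -⟩ := hpre
  unfold Spec_filterDates
  show filterDates m r low high = filterDates_alt m r low high
  simp only [filterDates, filterDates_alt]
  have hkeys : (PySem.Dict.mk m).keys = m.map Prod.fst := rfl
  rw [hkeys, pvLoop low high (m.map Prod.fst) (PySem.Dict.mk m) (PySem.Dict.mk r) h1]
  simp only
  refine Prod.ext ?_ ?_ <;> simp only
  · apply List.filter_congr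
    intro kv hkv
    have hmem : kv.1 ∈ m.map Prod.fst := List.mem_map_of_mem hkv
    rw [pv_set_contains_bad m low high kv.1 hmem]
    simp [hmem]
  · apply List.filter_congr
    intro kv hkv
    have hcont : (PySem.Dict.mk m).contains kv.1 = decide (kv.1 ∈ m.map Prod.fst) := by
      rw [PySem.Dict.contains_eq_decide_mem_keys, hkeys]
    by_cases hmem : kv.1 ∈ m.map Prod.fst
    · rw [pv_set_contains_bad m low high kv.1 hmem]
      simp [hcont, hmem]
    · simp [hcont, hmem]
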